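-- pv_equiv track=rewrite | github.com/kodai731/AnimationModelTraining | src/anim_ml/utils/topology.py | _compute_chain_lengths_to_leaf
-- ===== SOURCE A (Python) =====
-- def _compute_chain_lengths_to_leaf(
--     children: list[list[int]],
--     num_joints: int,
-- ) -> list[int]:
--     lengths = [0] * num_joints
--
--     for i in reversed(range(num_joints)):
--         if not children[i]:
--             lengths[i] = 0
--         else:
--             lengths[i] = 1 + max(lengths[c] for c in children[i])
--
--     return lengths
-- ===== SOURCE B (Python) =====
-- def _compute_chain_lengths_to_leaf(
--     children: list[list[int]],
--     num_joints: int,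
-- ) -> list[int]:
--     memo: dict[int, int] = {}
--
--     def depth(i: int) -> int:
--         cached = memo.get(i)
--         if cached is not None:
--             return cached
--         kids = children[i]
--         if not kids:
--             d = 0
--         else:
--             best = depth(kids[0])
--             for c in kids[1:]:
--                 best = max(best, depth(c))
--             d = 1 + best
--         memo[i] = d
--         return d
--
--     return [depth(i) for i in range(num_joints)]
-- ===== Notes on version B (the rewrite author's own statement) =====
-- stated objective: alternative
-- what changed: Replaces the reverse index sweep over a mutable lengths array with a recursive memoized depth function over the tree structure, building the output by calling depth(i) for each joint.
-- outside the precondition, e.g. on _compute_chain_lengths_to_leaf([[0]], 1): A returns [1], B raises RecursionError; on _compute_chain_lengths_to_leaf([[], [], [0]], 3): A returns [0, 0, 1], B returns [0, 0, 1]; on _compute_chain_lengths_to_leaf([[1], [], [0]], 3): A returns [1, 0, 1], B returns [1, 0, 2]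
import Mathlib
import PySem

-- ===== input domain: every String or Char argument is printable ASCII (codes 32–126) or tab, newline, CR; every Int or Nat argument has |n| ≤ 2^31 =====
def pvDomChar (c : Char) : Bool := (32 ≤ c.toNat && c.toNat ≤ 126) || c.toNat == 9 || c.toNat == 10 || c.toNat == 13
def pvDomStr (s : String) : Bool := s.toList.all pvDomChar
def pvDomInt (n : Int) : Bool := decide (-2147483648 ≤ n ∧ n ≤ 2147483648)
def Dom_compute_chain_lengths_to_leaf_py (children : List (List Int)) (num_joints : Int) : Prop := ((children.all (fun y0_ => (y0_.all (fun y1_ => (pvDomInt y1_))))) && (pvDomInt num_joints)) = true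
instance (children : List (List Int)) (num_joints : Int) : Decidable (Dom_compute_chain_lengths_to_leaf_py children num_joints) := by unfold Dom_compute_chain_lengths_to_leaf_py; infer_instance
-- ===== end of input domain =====

-- B replaces A's reverse index sweep over a mutable lengths array by a memoized recursive
-- depth function over the tree structure (alternative decomposition; no speed claim).

-- ===== PORT A =====
-- one loop body: lengths[i] = 0 or 1 + max(lengths[c] for c in children[i]).
-- IndexError paths (children[i] or lengths[c] out of range) are outside Pre_ and collapse
-- to defaults here; exact on every input satisfying Pre_.
def pvAStep (children : List (List Int)) (lengths : List Int) (i : Int) : List Int :=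
  match (PySem.List.pyGet? children i).getD [] with
  | [] => PySem.List.pySetD lengths i 0
  | k :: ks =>
      let m := ks.foldl (fun acc c => max acc (PySem.List.pyGetD lengths c 0))
        (PySem.List.pyGetD lengths k 0)
      PySem.List.pySetD lengths i (1 + m)

def compute_chain_lengths_to_leaf_py (children : List (List Int)) (num_joints : Int) : List Int :=
  let lengths := List.replicate num_joints.toNat (0 : Int)
  (PySem.List.pyRange 0 num_joints 1).reverse.foldl (pvAStep children) lengths

-- ===== PORT B =====
-- depth(i) with the memo dict threaded through; fuel only makes the recursion total
-- (inside Pre_ the recursion depth is < num_joints, so fuel is never exhausted).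
def pvDepth (children : List (List Int)) (fuel : Nat) (memo : PySem.Dict Int Int) (i : Int) :
    Int × PySem.Dict Int Int :=
  match fuel with
  | 0 => (0, memo)
  | f + 1 =>
    match memo.get? i with
    | some d => (d, memo)
    | none =>
      match (PySem.List.pyGet? children i).getD [] with
      | [] => (0, memo.insert i 0)
      | k :: ks =>
        let p0 := pvDepth children f memo k
        let pend := ks.foldl
          (fun (p : Int × PySem.Dict Int Int) c =>
            let pc := pvDepth children f p.2 c
            (max p.1 pc.1, pc.2)) p0
        (1 + pend.1, pend.2.insert i (1 + pend.1))

def compute_chain_lengths_to_leaf_py_alt (children : List (List Int)) (num_joints : Int) : List Int :=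
  ((PySem.List.pyRange 0 num_joints 1).foldl
    (fun (p : List Int × PySem.Dict Int Int) i =>
      let q := pvDepth children num_joints.toNat p.2 i
      (p.1 ++ [q.1], q.2)) ([], PySem.Dict.empty)).1

-- ===== PRECONDITION & SPEC =====
-- Pre_ excludes inputs where A raises IndexError (num_joints > len(children), or a child
-- index ≥ num_joints) and children lists that are not strictly topologically ordered
-- (some child index ≤ its parent's, incl. negative indices): there A's reverse sweep reads
-- leftover zeros or wrapped entries — an artefact of its in-place sweep — and B's natural
-- recursion may not terminate (cycles).
def Pre_compute_chain_lengths_to_leaf_py (children : List (List Int)) (num_joints : Int) : Prop :=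
  num_joints ≤ (children.length : Int) ∧
  ∀ i < num_joints.toNat, ∀ c ∈ children.getD i [], (i : Int) < c ∧ c < num_joints
instance (children : List (List Int)) (num_joints : Int) : Decidable (Pre_compute_chain_lengths_to_leaf_py children num_joints) := by unfold Pre_compute_chain_lengths_to_leaf_py; infer_instance

def pvWitness_compute_chain_lengths_to_leaf_py : List (List Int) × Int := ([[1, 2], [3], [3], []], 4)

def Spec_compute_chain_lengths_to_leaf_py (children : List (List Int)) (num_joints : Int) (out : List Int) : Prop := out = compute_chain_lengths_to_leaf_py_alt children num_joints
instance (children : List (List Int)) (num_joints : Int) (out : List Int) : Decidable (Spec_compute_chain_lengths_to_leaf_py children num_joints out) := by unfold Spec_compute_chain_lengths_to_leaf_py; infer_instance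

-- ===== CLAIM (what is proved, stated in full; the proofs are below) =====
def Claim_equal_compute_chain_lengths_to_leaf_py : Prop := ∀ (children : List (List Int)) (num_joints : Int), Dom_compute_chain_lengths_to_leaf_py children num_joints → Pre_compute_chain_lengths_to_leaf_py children num_joints → Spec_compute_chain_lengths_to_leaf_py children num_joints (compute_chain_lengths_to_leaf_py children num_joints)

-- ===== LEMMAS AND PROOFS =====

-- reference depth function (fuel-indexed, memo-free)
def pvDep (children : List (List Int)) : Nat → Int → Int
  | 0, _ => 0
  | f + 1, i =>
    match children.getD i.toNat [] with
    | [] => 0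
    | k :: ks => 1 + ks.foldl (fun a c => max a (pvDep children f c)) (pvDep children f k)

theorem pvDep_fuel (children : List (List Int)) (num_joints : Int)
    (hpre : Pre_compute_chain_lengths_to_leaf_py children num_joints) :
    ∀ f g i, 0 ≤ i → i < num_joints → num_joints.toNat - i.toNat ≤ f →
      num_joints.toNat - i.toNat ≤ g → pvDep children f i = pvDep children g i := by
  obtain ⟨hlen, htopo⟩ := hpre
  intro f
  induction f using Nat.strong_induction_on with
  | _ f ih =>
    intro g i hi0 hin hf hg
    have hit : i.toNat < num_joints.toNat := by omega
    obtain ⟨f', rfl⟩ : ∃ f', f = f' + 1 := ⟨f - 1, by omega⟩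
    obtain ⟨g', rfl⟩ : ∃ g', g = g' + 1 := ⟨g - 1, by omega⟩
    · have hkids := htopo i.toNat hit
      have hchild : ∀ c ∈ children.getD i.toNat [], pvDep children f' c = pvDep children g' c := by
        intro c hc
        obtain ⟨hic, hcn⟩ := hkids c hc
        have hi' : (i.toNat : Int) = i := Int.toNat_of_nonneg hi0
        have hc0 : (0:Int) ≤ c := by omega
        have hct : i.toNat < c.toNat ∧ c.toNat < num_joints.toNat := by omega
        exact ih f' (by omega) g' c hc0 hcn (by omega) (by omega)
      simp only [pvDep]
      cases hck : children.getD i.toNat [] with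
      | nil => rfl
      | cons k ks =>
        dsimp only
        have hk : pvDep children f' k = pvDep children g' k :=
          hchild k (by rw [hck]; exact List.mem_cons_self)
        rw [hk]
        have := PySem.List.foldl_congr_mem
          (l := ks) (init := pvDep children g' k)
          (f := fun a c => max a (pvDep children f' c))
          (g := fun a c => max a (pvDep children g' c))
          (by intro acc x hx; dsimp only
              rw [hchild x (by rw [hck]; exact List.mem_cons_of_mem _ hx)])
        rw [this]

-- abbreviation used throughout
def pvD (children : List (List Int)) (num_joints : Int) (i : Int) : Int :=
  pvDep children num_joints.toNat i

theorem pvA_main (children : List (List Int)) (num_joints : Int)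
    (hpre : Pre_compute_chain_lengths_to_leaf_py children num_joints) :
    ∀ k, k ≤ num_joints.toNat → ∀ L : List Int, L.length = num_joints.toNat →
      (∀ j, k ≤ j → (hj : j < num_joints.toNat) → (hjl : j < L.length) →
        L[j] = pvD children num_joints j) →
      ∃ L' : List Int, (PySem.List.pyRange 0 (k : Int) 1).reverse.foldl (pvAStep children) L = L' ∧
        L'.length = num_joints.toNat ∧
        (∀ j, (hj : j < num_joints.toNat) → (hjl : j < L'.length) →
          L'[j] = pvD children num_joints j) := by
  obtain ⟨hlen, htopo⟩ := id hpre
  have hlen2 : num_joints.toNat ≤ children.length := by omega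
  intro k
  induction k with
  | zero =>
    intro _ L hL hinv
    refine ⟨L, ?_, hL, ?_⟩
    · rw [show ((0 : Nat) : Int) = 0 from rfl, PySem.List.pyRange_one_eq_nil le_rfl]
      rfl
    · intro j hj hjl; exact hinv j (Nat.zero_le j) hj hjl
  | succ k ihk =>
    intro hk1 L hL hinv
    have hk : k < num_joints.toNat := by omega
    have hkL : k < L.length := by omega
    obtain ⟨m, hm⟩ : ∃ m, num_joints.toNat = m + 1 := ⟨num_joints.toNat - 1, by omega⟩
    have hsplit : PySem.List.pyRange 0 ((k + 1 : Nat) : Int) 1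
        = PySem.List.pyRange 0 (k : Int) 1 ++ [(k : Int)] := by
      push_cast
      exact PySem.List.pyRange_one_succ_right (by positivity)
    rw [hsplit, List.reverse_append]
    simp only [List.reverse_cons, List.reverse_nil, List.nil_append, List.singleton_append,
      List.foldl_cons]
    have hgw : PySem.List.pyGet? children (k : Int) = some (children.getD k []) := by
      rw [PySem.List.pyGet?_natCast, List.getElem?_eq_getElem (by omega),
        List.getD_eq_getElem _ _ (by omega)]
    have hDk : ∀ c ∈ children.getD k [], (k : Int) < c ∧ c < num_joints := htopo k hk
    have hmemD : ∀ c ∈ children.getD k [],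
        PySem.List.pyGetD L c 0 = pvDep children m c := by
      intro c hc
      obtain ⟨hkc, hcn⟩ := hDk c hc
      have hc0 : (0 : Int) ≤ c := by omega
      have hct : k < c.toNat ∧ c.toNat < num_joints.toNat := by omega
      rw [PySem.List.pyGetD_eq_getElem L 0 hc0 (by rw [hL]; omega)]
      have := hinv c.toNat (by omega) (by omega) (by omega)
      rw [this]
      have hcast : ((c.toNat : Nat) : Int) = c := Int.toNat_of_nonneg hc0
      rw [hcast]
      unfold pvD
      exact pvDep_fuel children num_joints hpre _ _ c hc0 hcn (by omega) (by omega)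
    have hstep : pvAStep children L (k : Int)
        = L.set k (pvD children num_joints (k : Int)) := by
      unfold pvAStep
      rw [hgw]
      simp only [Option.getD_some]
      cases hck : children.getD k [] with
      | nil =>
        rw [PySem.List.pySetD_natCast]
        unfold pvD
        rw [hm]
        simp only [pvDep, Int.toNat_natCast, hck]
      | cons k0 ks =>
        dsimp only
        rw [PySem.List.pySetD_natCast]
        congr 1
        conv_rhs => rw [pvD, hm]
        simp only [pvDep, Int.toNat_natCast, hck]
        congr 1
        rw [hmemD k0 (by rw [hck]; exact List.mem_cons_self)]
        exact PySem.List.foldl_congr_mem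
          (l := ks) (init := pvDep children m k0)
          (f := fun acc c => max acc (PySem.List.pyGetD L c 0))
          (g := fun a c => max a (pvDep children m c))
          (by
            intro acc x hx
            dsimp only
            rw [hmemD x (by rw [hck]; exact List.mem_cons_of_mem _ hx)])
    rw [hstep]
    apply ihk (by omega)
    · simp [hL]
    · intro j hj hjn hjl
      by_cases hjk : j = k
      · subst hjk
        rw [List.getElem_set_self]
      · rw [List.getElem_set_ne (by omega)]
        exact hinv j (by omega) hjn (by simpa using hjl)

def pvMemoOK (children : List (List Int)) (num_joints : Int) (memo : PySem.Dict Int Int) : Prop :=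
  ∀ j d, memo.get? j = some d → d = pvD children num_joints j

theorem pvB_depth (children : List (List Int)) (num_joints : Int)
    (hpre : Pre_compute_chain_lengths_to_leaf_py children num_joints) :
    ∀ f i memo, pvMemoOK children num_joints memo → 0 ≤ i → i < num_joints →
      num_joints.toNat - i.toNat ≤ f →
      (pvDepth children f memo i).1 = pvD children num_joints i ∧
      pvMemoOK children num_joints (pvDepth children f memo i).2 := by
  obtain ⟨hlen, htopo⟩ := id hpre
  have hlen2 : num_joints.toNat ≤ children.length := by omega
  intro f
  induction f using Nat.strong_induction_on with
  | _ f ih =>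
    intro i memo hmemo hi0 hin hf
    obtain ⟨f', rfl⟩ : ∃ f', f = f' + 1 := ⟨f - 1, by omega⟩
    have hit : i.toNat < num_joints.toNat := by omega
    obtain ⟨m, hm⟩ : ∃ m, num_joints.toNat = m + 1 := ⟨num_joints.toNat - 1, by omega⟩
    have hDk : ∀ c ∈ children.getD i.toNat [], i < c ∧ c < num_joints := by
      intro c hc
      have := htopo i.toNat hit c hc
      rwa [Int.toNat_of_nonneg hi0] at this
    simp only [pvDepth]
    cases hmg : memo.get? i with
    | some d => exact ⟨hmemo i d hmg, hmemo⟩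
    | none =>
      have hgw : PySem.List.pyGet? children i = some (children.getD i.toNat []) := by
        rw [PySem.List.pyGet?_eq_some_getElem children hi0 (by omega),
          List.getD_eq_getElem _ _ (by omega)]
      rw [hgw]
      simp only [Option.getD_some]
      cases hck : children.getD i.toNat [] with
      | nil =>
        have hD0 : pvD children num_joints i = 0 := by
          unfold pvD
          rw [hm]
          simp only [pvDep, hck]
        refine ⟨hD0.symm, ?_⟩
        intro j d hj
        rw [PySem.Dict.get?_insert] at hj
        split_ifs at hj with hji
        · subst hji
          rw [hD0]
          exact (Option.some_inj.mp hj).symm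
        · exact hmemo j d hj
      | cons k0 ks =>
        have hk0mem : k0 ∈ children.getD i.toNat [] := by
          rw [hck]; exact List.mem_cons_self
        obtain ⟨hik0, hk0n⟩ := hDk k0 hk0mem
        have hk0t : i.toNat < k0.toNat ∧ k0.toNat < num_joints.toNat := by omega
        have h0 := ih f' (by omega) k0 memo hmemo (by omega) hk0n (by omega)
        have hfold : ∀ (l : List Int), (∀ c ∈ l, c ∈ children.getD i.toNat []) →
            ∀ (p : Int × PySem.Dict Int Int), pvMemoOK children num_joints p.2 →
            ((l.foldl (fun (p : Int × PySem.Dict Int Int) c =>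
                let pc := pvDepth children f' p.2 c
                (max p.1 pc.1, pc.2)) p).1
              = l.foldl (fun a c => max a (pvD children num_joints c)) p.1 ∧
             pvMemoOK children num_joints
              ((l.foldl (fun (p : Int × PySem.Dict Int Int) c =>
                let pc := pvDepth children f' p.2 c
                (max p.1 pc.1, pc.2)) p).2)) := by
          intro l
          induction l with
          | nil => exact fun _ p hp => ⟨rfl, hp⟩
          | cons c cs ihl =>
            intro hmem p hp
            have hcmem := hmem c List.mem_cons_self
            obtain ⟨hic, hcn⟩ := hDk c hcmem
            have hc0 : (0 : Int) ≤ c := by omega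
            have hct : i.toNat < c.toNat ∧ c.toNat < num_joints.toNat := by omega
            have hrec := ih f' (by omega) c p.2 hp hc0 hcn (by omega)
            simp only [List.foldl_cons]
            have hstep := ihl (fun x hx => hmem x (List.mem_cons_of_mem _ hx))
              (max p.1 (pvDepth children f' p.2 c).1, (pvDepth children f' p.2 c).2) hrec.2
            refine ⟨?_, hstep.2⟩
            rw [hstep.1, hrec.1]
        have hff := hfold ks (by intro x hx; rw [hck]; exact List.mem_cons_of_mem _ hx)
          (pvDepth children f' memo k0) h0.2
        have hDi : pvD children num_joints i
            = 1 + (ks.foldl (fun a c => max a (pvD children num_joints c))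
                (pvDepth children f' memo k0).1) := by
          conv_lhs => rw [pvD, hm]
          simp only [pvDep, hck]
          congr 1
          rw [h0.1]
          have hseed : pvDep children m k0 = pvD children num_joints k0 := by
            unfold pvD
            exact pvDep_fuel children num_joints hpre _ _ k0 (by omega) hk0n (by omega) (by omega)
          rw [hseed]
          exact PySem.List.foldl_congr_mem
            (l := ks) (init := pvD children num_joints k0)
            (f := fun a c => max a (pvDep children m c))
            (g := fun a c => max a (pvD children num_joints c))
            (by
              intro acc x hx
              dsimp only
              have hxmem : x ∈ children.getD i.toNat [] := by
                rw [hck]; exact List.mem_cons_of_mem _ hx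
              obtain ⟨hix, hxn⟩ := hDk x hxmem
              have : pvDep children m x = pvD children num_joints x := by
                unfold pvD
                exact pvDep_fuel children num_joints hpre _ _ x (by omega) hxn (by omega) (by omega)
              rw [this])
        dsimp only
        refine ⟨?_, ?_⟩
        · rw [hff.1, hDi]
        · intro j d hj
          rw [PySem.Dict.get?_insert] at hj
          split_ifs at hj with hji
          · subst hji
            rw [hDi, ← hff.1]
            exact (Option.some_inj.mp hj).symm
          · exact hff.2 j d hj

theorem pvB_top (children : List (List Int)) (num_joints : Int)
    (hpre : Pre_compute_chain_lengths_to_leaf_py children num_joints) :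
    ∀ (is : List Int), (∀ i ∈ is, 0 ≤ i ∧ i < num_joints) →
      ∀ acc memo, pvMemoOK children num_joints memo →
      (is.foldl (fun (p : List Int × PySem.Dict Int Int) i =>
        let q := pvDepth children num_joints.toNat p.2 i
        (p.1 ++ [q.1], q.2)) (acc, memo)).1 = acc ++ is.map (pvD children num_joints) := by
  intro is
  induction is with
  | nil => intro _ acc memo _; simp
  | cons i it ihl =>
    intro hmem acc memo hmemo
    obtain ⟨hi0, hin⟩ := hmem i List.mem_cons_self
    have hd := pvB_depth children num_joints hpre num_joints.toNat i memo hmemo hi0 hin (by omega)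
    simp only [List.foldl_cons, List.map_cons]
    rw [ihl (fun x hx => hmem x (List.mem_cons_of_mem _ hx)) _ _ hd.2]
    rw [hd.1]
    simp

-- ===== VERDICT (by name: the statement is the Claim_ definition above) =====
theorem compute_chain_lengths_to_leaf_py_spec : Claim_equal_compute_chain_lengths_to_leaf_py := by
  intro children num_joints _hdom hpre
  unfold Spec_compute_chain_lengths_to_leaf_py
  unfold compute_chain_lengths_to_leaf_py compute_chain_lengths_to_leaf_py_alt
  dsimp only
  by_cases hneg : num_joints ≤ 0
  · rw [PySem.List.pyRange_one_eq_nil hneg]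
    simp [show num_joints.toNat = 0 by omega]
  · have h0 : (0 : Int) ≤ num_joints := by omega
    have hcast : ((num_joints.toNat : Nat) : Int) = num_joints := Int.toNat_of_nonneg h0
    obtain ⟨L', hfold, hlenL, hvals⟩ := pvA_main children num_joints hpre num_joints.toNat le_rfl
      (List.replicate num_joints.toNat 0) (by simp)
      (by intro j hj hjn _; omega)
    rw [hcast] at hfold
    rw [hfold]
    have hB := pvB_top children num_joints hpre (PySem.List.pyRange 0 num_joints 1)
      (by
        intro x hx
        have := PySem.List.mem_pyRange_one.mp hx
        exact ⟨this.1, this.2⟩)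
      [] PySem.Dict.empty
      (by intro j d hj; rw [PySem.Dict.get?_empty] at hj; cases hj)
    rw [hB, List.nil_append]
    apply List.ext_getElem
    · rw [hlenL, List.length_map, PySem.List.length_pyRange_one]
      omega
    · intro j h1 h2
      rw [List.getElem_map, PySem.List.getElem_pyRange_one, zero_add]
      have := hvals j (by omega) h1
      rw [this]
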